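-- pv_equiv track=rewrite | github.com/musicfox/pycmc | pycmc/chart_cleaners.py | get_composers
-- ===== SOURCE A (Python) =====
-- def get_composers(res):
--     """
--     Get the composers for the given track.
--
--     **Parameters**
--
--     - `res`:     string composer names for each track within charts
--
--     **Returns**
--
--     A dictionary of composers `{composer_num: composer_name}`.
--     """
--     if res != None:
--         res = res.replace(", Jr", " Jr")
--         composers = [
--             name.strip()
--             for first_split in res.split(", ")
--             for name in first_split.split(" % ")
--         ]
--         return {f"composer_{i + 1}": name for i, name in enumerate(composers)}
--     return {"composer_1": None}
-- ===== SOURCE B (Python) =====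
-- def get_composers(res):
--     if res is None:
--         return {"composer_1": None}
--     s = res.replace(", Jr", " Jr")
--     names = []
--     cur = []
--     i = 0
--     n = len(s)
--     while i < n:
--         if s.startswith(", ", i):
--             names.append("".join(cur))
--             cur = []
--             i += 2
--         elif s.startswith(" % ", i):
--             names.append("".join(cur))
--             cur = []
--             i += 3
--         else:
--             cur.append(s[i])
--             i += 1
--     names.append("".join(cur))
--     return {"composer_%d" % (k + 1): name.strip() for k, name in enumerate(names)}
-- ===== Notes on version B (the rewrite author's own statement) =====
-- stated objective: alternative
-- what changed: Replaces the two-level nested double comprehension (split on the comma-space delimiter, then each piece on the percent delimiter) by a single left-to-right character scan that recognises both delimiters in one pass (comma delimiter tried first) and accumulates the current token; the Jr-replacement guard and the None branch are kept.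
import Mathlib
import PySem

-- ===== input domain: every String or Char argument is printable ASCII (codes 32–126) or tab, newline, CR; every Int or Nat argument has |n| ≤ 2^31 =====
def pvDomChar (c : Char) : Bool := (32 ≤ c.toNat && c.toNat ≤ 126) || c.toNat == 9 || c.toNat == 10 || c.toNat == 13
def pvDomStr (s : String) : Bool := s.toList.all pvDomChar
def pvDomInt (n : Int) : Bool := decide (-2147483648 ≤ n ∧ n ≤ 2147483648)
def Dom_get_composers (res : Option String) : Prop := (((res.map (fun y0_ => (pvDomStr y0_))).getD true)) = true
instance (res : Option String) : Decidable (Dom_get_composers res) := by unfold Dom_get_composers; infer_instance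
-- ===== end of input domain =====

-- B replaces the nested split(", ")/split(" % ") double comprehension by one left-to-right
-- character scan recognising both delimiters in a single pass (objective: alternative).

-- ===== PORT A =====
def get_composers (res : Option String) : List (String × Option String) :=
  match res with
  | some r =>
    let r2 := PySem.Str.replace r ", Jr" " Jr"
    -- res.split(", ") / first_split.split(" % "): both sep literals are nonempty so split? = some
    let composers :=
      ((PySem.Str.split? r2 ", ").getD []).flatMap
        (fun fs => ((PySem.Str.split? fs " % ").getD []).map (fun name => PySem.Str.strip name))
    (PySem.List.enumerate composers).map
      (fun p => ("composer_" ++ PySem.Int.toStr (p.1 + 1), some p.2))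
  | none => [("composer_1", none)]

-- ===== PORT B =====
-- the while loop of Source B: one pass over the characters, ", " tried before " % ",
-- cur is the current token, a finished token is emitted at each delimiter and at the end
def pvTokB : List Char → List Char → List (List Char)
  | ',' :: ' ' :: rest, cur => cur :: pvTokB rest []
  | ' ' :: '%' :: ' ' :: rest, cur => cur :: pvTokB rest []
  | c :: rest, cur => pvTokB rest (cur ++ [c])
  | [], cur => [cur]

def get_composers_alt (res : Option String) : List (String × Option String) :=
  match res with
  | none => [("composer_1", none)]
  | some r =>
    let s := PySem.Str.replace r ", Jr" " Jr"
    let names := (pvTokB s.toList []).map (fun cs => String.ofList cs)  -- "".join(cur)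
    (PySem.List.enumerate names).map
      (fun p => ("composer_" ++ PySem.Int.toStr (p.1 + 1), some (PySem.Str.strip p.2)))

-- ===== PRECONDITION & SPEC =====
def Spec_get_composers (res : Option String) (out : List (String × Option String)) : Prop := out = get_composers_alt res
instance (res : Option String) (out : List (String × Option String)) : Decidable (Spec_get_composers res out) := by unfold Spec_get_composers; infer_instance

-- ===== CLAIM (what is proved, stated in full; the proofs are below) =====
def Claim_equal_get_composers : Prop := ∀ (res : Option String), Dom_get_composers res → Spec_get_composers res (get_composers res)

-- ===== LEMMAS AND PROOFS =====

-- structural characterisation of Python's s.split(sep) for a nonempty sep (head char a, tail sep')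
def splitRec (a : Char) (sep' : List Char) : List Char → List (List Char)
  | [] => [[]]
  | c :: rest =>
    if (a :: sep').isPrefixOf (c :: rest) then
      [] :: splitRec a sep' ((c :: rest).drop (a :: sep').length)
    else
      match splitRec a sep' rest with
      | [] => []          -- unreachable: splitRec never returns []
      | p :: ps => (c :: p) :: ps
  termination_by l => l.length
  decreasing_by all_goals (simp only [List.length_drop, List.length_cons]; omega)

-- prepend x onto the first piece
def prep (x : List Char) : List (List Char) → List (List Char)
  | [] => [x]
  | p :: ps => (x ++ p) :: ps

theorem splitRec_ne_nil (a : Char) (sep' : List Char) (l : List Char) :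
    splitRec a sep' l ≠ [] := by
  fun_induction splitRec a sep' l <;> simp_all

theorem splitRec_head_prefix (a : Char) (sep' : List Char) (l : List Char)
    (p : List Char) (ps : List (List Char)) (h : splitRec a sep' l = p :: ps) :
    p <+: l := by
  fun_induction splitRec a sep' l generalizing p ps with
  | case1 =>
    simp only [List.cons.injEq] at h
    simp [← h.1]
  | case2 c rest hpre ih =>
    simp only [List.cons.injEq] at h
    simp [← h.1]
  | case3 c rest hpre heq => exact absurd heq (splitRec_ne_nil _ _ _)
  | case4 c rest hpre p' ps' heq ih =>
    simp only [List.cons.injEq] at h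
    obtain ⟨h1, h2⟩ := h
    subst h1
    exact List.cons_prefix_cons.mpr ⟨rfl, ih _ _ heq⟩

theorem prep_nil_of_ne_nil {S : List (List Char)} (h : S ≠ []) : prep [] S = S := by
  cases S with
  | nil => exact absurd rfl h
  | cons p ps => simp [prep]

theorem go_spec (a : Char) (sep' : List Char) (fuel : Nat) :
    ∀ (l cur : List Char) (acc : List (List Char)), l.length < fuel →
      PySem.Chars.splitOn.go (a :: sep') fuel l cur acc
        = acc.reverse ++ prep cur.reverse (splitRec a sep' l) := by
  induction fuel with
  | zero => intro l cur acc h; omega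
  | succ m ih =>
    intro l cur acc h
    match l with
    | [] =>
      rw [PySem.Chars.splitOn.go.eq_def]
      simp [splitRec, prep]
    | c :: rest =>
      rw [PySem.Chars.splitOn.go.eq_def]
      simp only []
      by_cases hp : (a :: sep').isPrefixOf (c :: rest) = true
      · rw [if_pos hp]
        rw [ih _ _ _ (by simp only [List.length_drop, List.length_cons] at *; omega)]
        rw [splitRec, if_pos hp]
        rw [List.reverse_nil, prep_nil_of_ne_nil (splitRec_ne_nil a sep' _)]
        simp [prep]
      · rw [if_neg hp]
        rw [ih _ _ _ (by simp at h ⊢; omega)]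
        rw [splitRec, if_neg hp]
        obtain ⟨p, ps, heq⟩ : ∃ p ps, splitRec a sep' rest = p :: ps := by
          cases hS : splitRec a sep' rest with
          | nil => exact absurd hS (splitRec_ne_nil _ _ _)
          | cons p ps => exact ⟨p, ps, rfl⟩
        rw [heq]
        simp [prep]

theorem splitOn_eq (a : Char) (sep' : List Char) (l : List Char) :
    PySem.Chars.splitOn l (a :: sep') = splitRec a sep' l := by
  rw [PySem.Chars.splitOn, go_spec a sep' (l.length + 1) l [] [] (by omega)]
  simp [prep_nil_of_ne_nil (splitRec_ne_nil a sep' l)]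

-- the flattened token list produced by A's two nested splits
def flatTok (l : List Char) : List (List Char) :=
  (splitRec ',' [' '] l).flatMap (splitRec ' ' ['%', ' '])

theorem flatTok_ne_nil (l : List Char) : flatTok l ≠ [] := by
  unfold flatTok
  cases hS : splitRec ',' [' '] l with
  | nil => exact absurd hS (splitRec_ne_nil _ _ _)
  | cons p ps =>
    simp only [List.flatMap_cons]
    cases h3 : splitRec ' ' ['%', ' '] p with
    | nil => exact absurd h3 (splitRec_ne_nil _ _ _)
    | cons q qs => simp

theorem splitRec_comma_prefix (rest : List Char) :
    splitRec ',' [' '] (',' :: ' ' :: rest) = [] :: splitRec ',' [' '] rest := by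
  rw [splitRec, if_pos (by simp)]
  rfl

theorem flatTok_comma (rest : List Char) :
    flatTok (',' :: ' ' :: rest) = [] :: flatTok rest := by
  unfold flatTok
  rw [splitRec_comma_prefix, List.flatMap_cons]
  rw [show splitRec ' ' ['%', ' '] [] = [[]] from by rw [splitRec]]
  rfl

theorem flatTok_percent (rest : List Char) :
    flatTok (' ' :: '%' :: ' ' :: rest) = [] :: flatTok rest := by
  obtain ⟨p, ps, hS⟩ : ∃ p ps, splitRec ',' [' '] rest = p :: ps := by
    cases hS : splitRec ',' [' '] rest with
    | nil => exact absurd hS (splitRec_ne_nil _ _ _)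
    | cons p ps => exact ⟨p, ps, rfl⟩
  have h2 : splitRec ',' [' '] (' ' :: '%' :: ' ' :: rest)
      = (' ' :: '%' :: ' ' :: p) :: ps := by
    rw [splitRec, if_neg (by simp [List.isPrefixOf_iff_prefix, List.cons_prefix_cons])]
    rw [splitRec, if_neg (by simp [List.isPrefixOf_iff_prefix, List.cons_prefix_cons])]
    rw [splitRec, if_neg (by simp [List.isPrefixOf_iff_prefix, List.cons_prefix_cons])]
    rw [hS]
  have h3 : splitRec ' ' ['%', ' '] (' ' :: '%' :: ' ' :: p)
      = [] :: splitRec ' ' ['%', ' '] p := by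
    rw [splitRec, if_pos (by simp)]
    rfl
  unfold flatTok
  rw [h2, hS, List.flatMap_cons, List.flatMap_cons, h3]
  rfl

theorem flatTok_other (c : Char) (rest : List Char)
    (h1 : ∀ (r' : List Char), c = ',' → rest = ' ' :: r' → False)
    (h2 : ∀ (r' : List Char), c = ' ' → rest = '%' :: ' ' :: r' → False) :
    ∀ q Q, flatTok rest = q :: Q → flatTok (c :: rest) = (c :: q) :: Q := by
  intro q Q hfr
  obtain ⟨p, ps, hS⟩ : ∃ p ps, splitRec ',' [' '] rest = p :: ps := by
    cases hS : splitRec ',' [' '] rest with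
    | nil => exact absurd hS (splitRec_ne_nil _ _ _)
    | cons p ps => exact ⟨p, ps, rfl⟩
  have hnp1 : ¬ ([',', ' '].isPrefixOf (c :: rest) = true) := by
    intro hb
    obtain ⟨t, ht⟩ := List.isPrefixOf_iff_prefix.mp hb
    simp only [List.cons_append, List.nil_append, List.cons.injEq] at ht
    exact h1 t ht.1.symm ht.2.symm
  have hsplit2 : splitRec ',' [' '] (c :: rest) = (c :: p) :: ps := by
    rw [splitRec, if_neg hnp1, hS]
  have hpfx : p <+: rest := splitRec_head_prefix _ _ _ _ _ hS
  have hnp3 : ¬ ([' ', '%', ' '].isPrefixOf (c :: p) = true) := by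
    intro hb
    obtain ⟨t, ht⟩ := List.isPrefixOf_iff_prefix.mp hb
    simp only [List.cons_append, List.nil_append, List.cons.injEq] at ht
    obtain ⟨u, hu⟩ := hpfx
    obtain ⟨hc, hp⟩ := ht
    subst hp
    simp only [List.cons_append] at hu
    exact h2 (t ++ u) hc.symm hu.symm
  obtain ⟨q', Q', h3⟩ : ∃ q' Q', splitRec ' ' ['%', ' '] p = q' :: Q' := by
    cases h3 : splitRec ' ' ['%', ' '] p with
    | nil => exact absurd h3 (splitRec_ne_nil _ _ _)
    | cons a b => exact ⟨a, b, rfl⟩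
  have hsplit3 : splitRec ' ' ['%', ' '] (c :: p) = (c :: q') :: Q' := by
    rw [splitRec, if_neg hnp3, h3]
  unfold flatTok at hfr ⊢
  rw [hsplit2, List.flatMap_cons, hsplit3]
  rw [hS, List.flatMap_cons, h3] at hfr
  simp only [List.cons_append, List.cons.injEq] at hfr ⊢
  simp_all

theorem tokB_eq (l cur : List Char) : pvTokB l cur = prep cur (flatTok l) := by
  fun_induction pvTokB l cur with
  | case1 rest cur ih =>
    rw [flatTok_comma, ih, prep_nil_of_ne_nil (flatTok_ne_nil rest)]
    simp [prep]
  | case2 rest cur ih =>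
    rw [flatTok_percent, ih, prep_nil_of_ne_nil (flatTok_ne_nil rest)]
    simp [prep]
  | case3 c rest cur h1 h2 ih =>
    obtain ⟨q, Q, hfr⟩ : ∃ q Q, flatTok rest = q :: Q := by
      cases hfr : flatTok rest with
      | nil => exact absurd hfr (flatTok_ne_nil _)
      | cons a b => exact ⟨a, b, rfl⟩
    rw [ih, flatTok_other c rest h1 h2 q Q hfr, hfr]
    simp [prep]
  | case4 cur =>
    unfold flatTok
    rw [show splitRec ',' [' '] ([] : List Char) = [[]] from by rw [splitRec]]
    rw [List.flatMap_cons]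
    rw [show splitRec ' ' ['%', ' '] [] = [[]] from by rw [splitRec]]
    simp [prep]

theorem enumerate_map {α β : Type} (f : α → β) (xs : List α) (s : Int) :
    PySem.List.enumerate (xs.map f) s = (PySem.List.enumerate xs s).map (fun p => (p.1, f p.2)) := by
  induction xs generalizing s with
  | nil => rfl
  | cons x t ih => simp [PySem.List.enumerate, ih]

-- ===== VERDICT (by name: the statement is the Claim_ definition above) =====
theorem get_composers_spec : Claim_equal_get_composers := by
  intro res _
  unfold Spec_get_composers
  cases res with
  | none => rfl
  | some r =>
    have hcomma : (", " : String).toList = [',', ' '] := by decide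
    have hperc : (" % " : String).toList = [' ', '%', ' '] := by decide
    simp only [get_composers, get_composers_alt]
    set L := (PySem.Str.replace r ", Jr" " Jr").toList with hL
    have hsplit2 : (PySem.Str.split? (PySem.Str.replace r ", Jr" " Jr") ", ").getD []
        = (splitRec ',' [' '] L).map String.ofList := by
      simp [PySem.Str.split?, PySem.Chars.split?, hcomma, splitOn_eq, hL]
    have hsplit3 : ∀ cs : List Char, (PySem.Str.split? (String.ofList cs) " % ").getD []
        = (splitRec ' ' ['%', ' '] cs).map String.ofList := by
      intro cs
      simp [PySem.Str.split?, PySem.Chars.split?, hperc, splitOn_eq]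
    have hstrip : ∀ cs : List Char, PySem.Str.strip (String.ofList cs)
        = String.ofList (PySem.Chars.strip cs) := by
      intro cs; simp [PySem.Str.strip]
    rw [hsplit2, tokB_eq, prep_nil_of_ne_nil (flatTok_ne_nil L), List.flatMap_map]
    simp only [hsplit3, List.map_map]
    rw [← List.map_flatMap]
    rw [show List.flatMap (splitRec ' ' ['%', ' ']) (splitRec ',' [' '] L) = flatTok L from rfl]
    rw [enumerate_map, enumerate_map, List.map_map, List.map_map]
    simp [Function.comp]
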